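-- pv_equiv track=rewrite | github.com/TrueAverium/Formalistic-Math-Calculator | NaturalsDef.py | is_less
-- ===== SOURCE A (Python) =====
-- universe = {}
--
-- def is_less(a, b):
--     if not a and not b:
--         return False
--     if a and not b:
--         return False
--     if not a and b:
--         return True
--     return is_less(predecessor(a), predecessor(b))
--
-- def label(value, label, group):
--     group.update({label: value})
--
-- def predecessor(n):
--     if "predecessor" in universe:
--         del universe["predecessor"]
--     label(n.copy(), "predecessor", universe)
--     universe["predecessor"].pop()
--     return universe["predecessor"]
-- ===== SOURCE B (Python) =====
-- def is_less(a, b):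
--     a = list(a)
--     b = list(b)
--     while a and b:
--         a.pop()
--         b.pop()
--     return (not a) and bool(b)
-- ===== Notes on version B (the rewrite author's own statement) =====
-- stated objective: faster
-- what changed: Replaces A's simultaneous recursion (with its dict-mediated predecessor helper) by one iterative loop that pops one element from copies of both lists until one empties, then checks emptiness once.
import Mathlib
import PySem

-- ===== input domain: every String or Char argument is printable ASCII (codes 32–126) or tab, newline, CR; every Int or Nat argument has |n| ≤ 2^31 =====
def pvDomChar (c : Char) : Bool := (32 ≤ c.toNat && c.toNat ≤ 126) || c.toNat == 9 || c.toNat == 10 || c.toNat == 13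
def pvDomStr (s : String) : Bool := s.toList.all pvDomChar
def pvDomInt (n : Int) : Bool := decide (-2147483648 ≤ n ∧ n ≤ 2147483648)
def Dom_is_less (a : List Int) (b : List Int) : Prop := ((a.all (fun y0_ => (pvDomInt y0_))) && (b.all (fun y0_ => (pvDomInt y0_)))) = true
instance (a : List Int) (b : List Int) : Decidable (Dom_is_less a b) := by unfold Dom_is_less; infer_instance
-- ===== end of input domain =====

-- B replaces A's recursion (with its dict-based predecessor helper) by an iterative
-- lockstep peeling loop followed by a single emptiness check; same return value, no mutation.
-- ===== PORT A =====
-- predecessor(n) copies n, stores it in the universe dict and pops the last element;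
-- its net effect on the returned value is n.dropLast (ported exactly as that value).
def pyPredecessor (n : List Int) : List Int := n.dropLast

def is_less (a : List Int) (b : List Int) : Bool :=
  if a = [] ∧ b = [] then false
  else if a ≠ [] ∧ b = [] then false
  else if a = [] ∧ b ≠ [] then true
  else is_less (pyPredecessor a) (pyPredecessor b)
termination_by a.length
decreasing_by
  simp only [pyPredecessor, List.length_dropLast]
  rename_i h1 _ h3
  have ha : a ≠ [] := by
    intro h; exact h3 ⟨h, by intro hb; exact h1 ⟨h, hb⟩⟩
  have : 0 < a.length := List.length_pos_iff.mpr ha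
  omega

-- ===== PORT B =====
-- the while loop: pop the last element of both lists while both are nonempty
def peelBoth (a : List Int) (b : List Int) : List Int × List Int :=
  if a ≠ [] ∧ b ≠ [] then peelBoth a.dropLast b.dropLast else (a, b)
termination_by a.length
decreasing_by
  simp only [List.length_dropLast]
  rename_i h
  have : 0 < a.length := List.length_pos_iff.mpr h.1
  omega

def is_less_alt (a : List Int) (b : List Int) : Bool :=
  let p := peelBoth a b
  p.1.isEmpty && !p.2.isEmpty

-- ===== PRECONDITION & SPEC =====
def Spec_is_less (a : List Int) (b : List Int) (out : Bool) : Prop := out = is_less_alt a b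
instance (a : List Int) (b : List Int) (out : Bool) : Decidable (Spec_is_less a b out) := by unfold Spec_is_less; infer_instance

-- ===== CLAIM (what is proved, stated in full; the proofs are below) =====
def Claim_equal_is_less : Prop := ∀ (a : List Int) (b : List Int), Dom_is_less a b → Spec_is_less a b (is_less a b)

-- ===== LEMMAS AND PROOFS =====

-- ===== VERDICT (by name: the statement is the Claim_ definition above) =====
theorem is_less_len : ∀ (n : Nat) (a b : List Int), a.length ≤ n →
    is_less a b = decide (a.length < b.length) := by
  intro n
  induction n with
  | zero =>
    intro a b h
    have ha : a = [] := List.eq_nil_of_length_eq_zero (Nat.le_zero.mp h)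
    subst ha
    cases b <;> simp [is_less]
  | succ n ih =>
    intro a b h
    rw [is_less]
    by_cases ha : a = [] <;> by_cases hb : b = []
    · subst ha hb; simp
    · subst ha; simp [hb, List.length_pos_iff.mpr hb]
    · subst hb; simp [ha]
    · simp only [ha, hb, and_false, false_and, not_false_iff, if_neg]
      have hlen : (pyPredecessor a).length ≤ n := by
        simp only [pyPredecessor, List.length_dropLast]
        have : 0 < a.length := List.length_pos_iff.mpr ha
        omega
      rw [ih _ _ hlen]
      simp only [pyPredecessor, List.length_dropLast]
      have hA : 0 < a.length := List.length_pos_iff.mpr ha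
      have hB : 0 < b.length := List.length_pos_iff.mpr hb
      by_cases hlt : a.length < b.length
      · simp [hlt]; omega
      · simp [hlt]; omega

theorem alt_len : ∀ (n : Nat) (a b : List Int), a.length ≤ n →
    is_less_alt a b = decide (a.length < b.length) := by
  intro n
  induction n with
  | zero =>
    intro a b h
    have ha : a = [] := List.eq_nil_of_length_eq_zero (Nat.le_zero.mp h)
    subst ha
    cases b <;> simp [is_less_alt, peelBoth]
  | succ n ih =>
    intro a b h
    by_cases ha : a = [] <;> by_cases hb : b = []
    · subst ha hb; simp [is_less_alt, peelBoth]
    · subst ha; simp [is_less_alt, peelBoth, hb, List.length_pos_iff.mpr hb]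
    · subst hb; simp [is_less_alt, peelBoth, ha]
    · have key : is_less_alt a b = is_less_alt a.dropLast b.dropLast := by
        simp only [is_less_alt]
        rw [peelBoth, if_pos ⟨ha, hb⟩]
      rw [key]
      have hlen : a.dropLast.length ≤ n := by
        have : 0 < a.length := List.length_pos_iff.mpr ha
        simp only [List.length_dropLast]; omega
      rw [ih _ _ hlen]
      simp only [List.length_dropLast]
      have hA : 0 < a.length := List.length_pos_iff.mpr ha
      have hB : 0 < b.length := List.length_pos_iff.mpr hb
      by_cases hlt : a.length < b.length
      · simp [hlt]; omega
      · simp [hlt]; omega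

theorem is_less_spec : Claim_equal_is_less := by
  intro a b _
  unfold Spec_is_less
  rw [is_less_len a.length a b le_rfl, alt_len a.length a b le_rfl]
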